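-- pv_equiv track=rewrite | github.com/Necronhym/Turtle-Breadth-first-search-pathfinding | BRS.py | checkMoves
-- ===== SOURCE A (Python) =====
-- def checkMoves( moves ):
--     i=0
--     j=0
--     for move in moves:
--         if move =="L":
--             j -= 1
--         elif move=="R":
--             j += 1
--         elif move=="U":
--             i -= 1
--         elif move=="D":
--             i += 1
--     return i, j;
-- ===== SOURCE B (Python) =====
-- def checkMoves(moves):
--     moves = list(moves)
--     return moves.count("D") - moves.count("U"), moves.count("R") - moves.count("L")
-- ===== Notes on version B (the rewrite author's own statement) =====
-- stated objective: idiomatic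
-- what changed: Replaced the single branching accumulator loop with a closed arithmetic form over occurrence counts: i = count('D') - count('U'), j = count('R') - count('L').
import Mathlib
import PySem

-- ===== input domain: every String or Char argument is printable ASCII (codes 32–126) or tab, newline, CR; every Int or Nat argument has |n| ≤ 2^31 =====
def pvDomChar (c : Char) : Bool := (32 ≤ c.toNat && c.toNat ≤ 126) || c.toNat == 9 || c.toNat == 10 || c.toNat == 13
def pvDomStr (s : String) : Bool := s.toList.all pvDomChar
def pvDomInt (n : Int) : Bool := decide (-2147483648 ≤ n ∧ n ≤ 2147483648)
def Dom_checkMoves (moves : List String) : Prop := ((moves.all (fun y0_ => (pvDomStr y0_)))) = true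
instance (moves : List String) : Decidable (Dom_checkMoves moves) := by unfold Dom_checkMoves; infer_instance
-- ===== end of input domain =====

-- ===== PORT A =====
-- B replaces the branching accumulator loop with arithmetic over occurrence counts (idiomatic).
def checkMoves (moves : List String) : Int × Int :=
  moves.foldl (fun (s : Int × Int) move =>
    if move == "L" then (s.1, s.2 - 1)
    else if move == "R" then (s.1, s.2 + 1)
    else if move == "U" then (s.1 - 1, s.2)
    else if move == "D" then (s.1 + 1, s.2)
    else s) (0, 0)

-- ===== PORT B =====
def checkMoves_alt (moves : List String) : Int × Int :=
  ((moves.count "D" : Int) - (moves.count "U" : Int),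
   (moves.count "R" : Int) - (moves.count "L" : Int))

-- ===== PRECONDITION & SPEC =====
def Spec_checkMoves (moves : List String) (out : Int × Int) : Prop := out = checkMoves_alt moves
instance (moves : List String) (out : Int × Int) : Decidable (Spec_checkMoves moves out) := by unfold Spec_checkMoves; infer_instance

-- ===== CLAIM (what is proved, stated in full; the proofs are below) =====
def Claim_equal_checkMoves : Prop := ∀ (moves : List String), Dom_checkMoves moves → Spec_checkMoves moves (checkMoves moves)

-- ===== LEMMAS AND PROOFS =====

-- ===== VERDICT (by name: the statement is the Claim_ definition above) =====
lemma checkMoves_loop (moves : List String) (i j : Int) :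
    moves.foldl (fun (s : Int × Int) move =>
      if move == "L" then (s.1, s.2 - 1)
      else if move == "R" then (s.1, s.2 + 1)
      else if move == "U" then (s.1 - 1, s.2)
      else if move == "D" then (s.1 + 1, s.2)
      else s) (i, j)
    = (i + (moves.count "D" : Int) - (moves.count "U" : Int),
       j + (moves.count "R" : Int) - (moves.count "L" : Int)) := by
  induction moves generalizing i j with
  | nil => simp
  | cons m ms ih =>
    simp only [List.foldl_cons, List.count_cons]
    by_cases hL : m = "L" <;> by_cases hR : m = "R" <;> by_cases hU : m = "U" <;>
      by_cases hD : m = "D" <;>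
      simp_all <;> ring_nf

theorem checkMoves_spec : Claim_equal_checkMoves := by
  intro moves _
  unfold Spec_checkMoves checkMoves checkMoves_alt
  rw [checkMoves_loop]
  simp
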